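-- pv_equiv track=rewrite | github.com/berkiskender/ProSep | utils_IVMSP.py | bit_reversal
-- ===== SOURCE A (Python) =====
-- def DecimalToBinary(n):
--     return bin(n).replace("0b", "")
--
-- def bit_reversal(x, N):
--     num_digit = 0
--     while N // 2:
--         N = N // 2
--         num_digit += 1
--     x = list(DecimalToBinary(x))
--     while len(x) < num_digit:
--         x = [0] + x
--     x.reverse()
--     return int("".join(str(n) for n in x), 2)
-- ===== SOURCE B (Python) =====
-- def bit_reversal(x, N):
--     num_digit = max(N.bit_length() - 1, 0)
--     nbits = max(x.bit_length(), num_digit)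
--     result = 0
--     for i in range(nbits):
--         result = result * 2 + ((x >> i) & 1)
--     return result
-- ===== Notes on version B (the rewrite author's own statement) =====
-- stated objective: faster
-- what changed: Replaces the decimal-to-binary string/list construction, the character pad-and-reverse loops and the int(.,2) reparse by pure integer arithmetic: bit_length gives the digit counts and one fold accumulates result = result*2 + ((x >> i) & 1).
import Mathlib
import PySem

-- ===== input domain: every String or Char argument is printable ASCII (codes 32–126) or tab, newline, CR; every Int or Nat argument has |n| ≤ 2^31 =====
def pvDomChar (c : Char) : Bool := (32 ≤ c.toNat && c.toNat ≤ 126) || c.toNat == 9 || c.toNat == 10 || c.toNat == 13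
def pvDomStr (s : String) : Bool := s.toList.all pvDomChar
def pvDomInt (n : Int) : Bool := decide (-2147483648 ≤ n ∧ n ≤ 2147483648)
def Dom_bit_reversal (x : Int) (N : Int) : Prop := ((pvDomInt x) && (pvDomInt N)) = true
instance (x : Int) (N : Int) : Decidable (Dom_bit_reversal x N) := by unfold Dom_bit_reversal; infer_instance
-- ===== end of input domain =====

-- B replaces A's binary-string/list manipulation by pure integer bit arithmetic
-- (bit_length for the digit counts, one arithmetic fold collecting the bits);
-- equivalence is claimed on x ≥ 0 ∧ N ≥ 0 (A raises ValueError for x < 0 and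
-- never terminates for N < 0).

-- ===== PORT A =====
-- the `while N // 2:` loop; the `0 ≤ N` guard only ensures termination (for N < 0 the Python loop never ends)
def pvNumDigitLoop (N : Int) (acc : Int) : Int :=
  if h : 0 ≤ N ∧ PySem.Int.floordiv N 2 ≠ 0 then
    pvNumDigitLoop (PySem.Int.floordiv N 2) (acc + 1)
  else acc
termination_by N.toNat
decreasing_by
  have h2 : PySem.Int.floordiv N 2 = N / 2 := by
    simp [PySem.Int.floordiv, Int.fdiv_eq_ediv_of_nonneg _ (by norm_num : (0:Int) ≤ 2)]
  omega

-- digits of n in binary, most significant first (empty for 0); hand-port of the digit part of bin()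
def pvGoBin (n : Nat) : List Char :=
  if n = 0 then []
  else pvGoBin (n / 2) ++ [if n % 2 = 1 then '1' else '0']

-- bin(x).replace("0b",""), as a list of characters (list(DecimalToBinary(x)))
def pvDecimalToBinary (x : Int) : List Char :=
  (if x < 0 then ['-'] else []) ++ (if x.natAbs = 0 then ['0'] else pvGoBin x.natAbs)

-- the `while len(x) < num_digit: x = [0] + x` loop (str(0) = "0", so the pad is the char '0')
def pvPadLoop (xs : List Char) (d : Int) : List Char :=
  if (xs.length : Int) < d then pvPadLoop ('0' :: xs) d else xs
termination_by d.toNat - xs.length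

-- int(s, 2); exact on strings of '0'/'1' digits, which is all Pre_ admits (x ≥ 0)
def pvParseBin2 (xs : List Char) : Int :=
  xs.foldl (fun a c => a * 2 + (if c = '1' then 1 else 0)) 0

def bit_reversal (x : Int) (N : Int) : Int :=
  pvParseBin2 ((pvPadLoop (pvDecimalToBinary x) (pvNumDigitLoop N 0)).reverse)

-- ===== PORT B =====
-- Python int.bit_length (length in bits of |n|)
def pvBitLength (n : Int) : Nat :=
  if n = 0 then 0 else Nat.log2 n.natAbs + 1

-- num_digit = max(N.bit_length() - 1, 0); nbits = max(x.bit_length(), num_digit);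
-- then for i in range(nbits): result = result * 2 + ((x >> i) & 1)
def bit_reversal_alt (x : Int) (N : Int) : Int :=
  (List.range (max (pvBitLength x : Int) (max ((pvBitLength N : Int) - 1) 0)).toNat).foldl
    (fun (r : Int) (i : Nat) => r * 2 + Int.land (x >>> (i : Int)) 1) 0

-- ===== PRECONDITION & SPEC =====
-- A raises ValueError for x < 0 (the '-' sign survives into int(·, 2)) and loops forever for N < 0.
def Pre_bit_reversal (x : Int) (N : Int) : Prop := 0 ≤ x ∧ 0 ≤ N
instance (x : Int) (N : Int) : Decidable (Pre_bit_reversal x N) := by unfold Pre_bit_reversal; infer_instance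
def pvWitness_bit_reversal : Int × Int := (6, 8)

def Spec_bit_reversal (x : Int) (N : Int) (out : Int) : Prop := out = bit_reversal_alt x N
instance (x : Int) (N : Int) (out : Int) : Decidable (Spec_bit_reversal x N out) := by unfold Spec_bit_reversal; infer_instance

-- ===== CLAIM (what is proved, stated in full; the proofs are below) =====
def Claim_equal_bit_reversal : Prop := ∀ (x : Int) (N : Int), Dom_bit_reversal x N → Pre_bit_reversal x N → Spec_bit_reversal x N (bit_reversal x N)

-- ===== LEMMAS AND PROOFS =====

lemma pvLog2_step (n : Nat) (h : 2 ≤ n) : Nat.log2 n = Nat.log2 (n / 2) + 1 := by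
  rw [Nat.log2_def]; simp [h]

-- bit length on Nat, matching pvBitLength on casts
def pvBL (n : Nat) : Nat := if n = 0 then 0 else Nat.log2 n + 1

lemma pvBitLength_natCast (n : Nat) : pvBitLength (n : Int) = pvBL n := by
  simp [pvBitLength, pvBL]

-- the common numeric value: reverse the low m bits of n
def pvF (n : Nat) (m : Nat) : Int :=
  (List.range m).foldl (fun r i => r * 2 + (if n.testBit i then 1 else 0)) 0

lemma pvF_zero_n (m : Nat) : pvF 0 m = 0 := by
  induction m with
  | zero => rfl
  | succ m ih => simp [pvF, List.range_succ, List.foldl_append] at *; simpa using ih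

lemma pvF_succ (n m : Nat) : pvF n (m + 1) = pvF n m * 2 + (if n.testBit m then 1 else 0) := by
  simp [pvF, List.range_succ, List.foldl_append]

lemma pvLt_two_pow_bl (n : Nat) : n < 2 ^ pvBL n := by
  unfold pvBL
  split
  · omega
  · exact Nat.lt_log2_self

lemma pvF_ext (n m k : Nat) (h : pvBL n ≤ m) : pvF n (m + k) = pvF n m * 2 ^ k := by
  induction k with
  | zero => simp
  | succ k ih =>
      have hb : n.testBit (m + k) = false := by
        apply Nat.testBit_eq_false_of_lt
        calc n < 2 ^ pvBL n := pvLt_two_pow_bl n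
        _ ≤ 2 ^ (m + k) := Nat.pow_le_pow_right (by norm_num) (by omega)
      rw [show m + (k + 1) = (m + k) + 1 by ring, pvF_succ, hb, ih]
      simp [pow_succ]; ring

-- A's while-loop computes Python's max(N.bit_length() - 1, 0) for N ≥ 0
lemma pvNumDigitLoop_eq (N : Int) (hN : 0 ≤ N) (acc : Int) :
    pvNumDigitLoop N acc = acc + max ((pvBitLength N : Int) - 1) 0 := by
  induction hn : N.toNat using Nat.strong_induction_on generalizing N acc with
  | _ n ih =>
    have hfd : PySem.Int.floordiv N 2 = N / 2 := by
      simp [PySem.Int.floordiv, Int.fdiv_eq_ediv_of_nonneg _ (by norm_num : (0:Int) ≤ 2)]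
    rw [pvNumDigitLoop]
    by_cases h2 : N / 2 = 0
    · have : N = 0 ∨ N = 1 := by omega
      rcases this with h | h <;> subst h <;>
        simp [h2, pvBitLength, Nat.log2_def]
    · have hge : 2 ≤ N := by omega
      rw [dif_pos ⟨hN, by rw [hfd]; exact h2⟩, hfd]
      rw [ih (N / 2).toNat (by omega) (N / 2) (by omega) (acc + 1) rfl]
      have hN2 : ((N / 2).natAbs) = N.natAbs / 2 := by
        have : N / 2 ≥ 0 := by omega
        omega
      have hlog : Nat.log2 N.natAbs = Nat.log2 (N.natAbs / 2) + 1 :=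
        pvLog2_step _ (by omega)
      have hnz : N ≠ 0 := by omega
      have hnz2 : N / 2 ≠ 0 := h2
      simp only [pvBitLength, if_neg hnz, if_neg hnz2, hN2, hlog]
      have hl0 : 0 ≤ (Nat.log2 (N.natAbs / 2) : Int) := by positivity
      push_cast
      omega

-- the digit list of n > 0, reversed, is the bits of n from LSB up
def pvBC (n : Nat) (i : Nat) : Char := if n.testBit i then '1' else '0'

lemma pvGoBin_reverse (n : Nat) :
    (pvGoBin n).reverse = (List.range (pvBL n)).map (pvBC n) := by
  induction n using Nat.strong_induction_on with
  | _ n ih =>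
    rw [pvGoBin]
    by_cases h : n = 0
    · simp [h, pvBL]
    · have hbl : pvBL n = pvBL (n / 2) + 1 := by
        by_cases h2 : n / 2 = 0
        · have : n = 1 := by omega
          subst this; simp [pvBL, Nat.log2_def]
        · have hlog : Nat.log2 n = Nat.log2 (n / 2) + 1 :=
            pvLog2_step _ (by omega)
          simp only [pvBL, if_neg h, if_neg h2]
          omega
      rw [if_neg h, List.reverse_append, hbl, List.range_succ_eq_map]
      simp only [List.map_cons, List.map_map]
      have h0 : pvBC n 0 = (if n % 2 = 1 then '1' else '0') := by
        simp [pvBC, Nat.testBit_zero]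
      have hshift : ∀ i, pvBC (n / 2) i = pvBC n (i + 1) := by
        intro i
        simp [pvBC, Nat.testBit_add_one]
      rw [ih (n / 2) (by omega)]
      simp [h0, Function.comp_def, hshift, Nat.succ_eq_add_one]

lemma pvPadLoop_eq (xs : List Char) (d : Int) :
    pvPadLoop xs d = List.replicate (d.toNat - xs.length) '0' ++ xs := by
  induction hk : d.toNat - xs.length generalizing xs with
  | zero => rw [pvPadLoop]; rw [if_neg (by omega)]; simp
  | succ k ih =>
    rw [pvPadLoop, if_pos (by omega)]
    rw [ih ('0' :: xs) (by simp; omega)]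
    rw [List.replicate_succ']
    simp

lemma pvParse_zeros (a : Int) (k : Nat) :
    List.foldl (fun a c => a * 2 + (if c = '1' then 1 else 0)) a (List.replicate k '0') = a * 2 ^ k := by
  induction k generalizing a with
  | zero => simp
  | succ k ih =>
      rw [List.replicate_succ, List.foldl_cons, ih]
      simp [pow_succ]; ring

lemma pvParse_bits (n m : Nat) :
    pvParseBin2 ((List.range m).map (pvBC n)) = pvF n m := by
  unfold pvParseBin2 pvF
  rw [List.foldl_map]
  have hf : (fun (a : Int) (i : Nat) => a * 2 + (if pvBC n i = '1' then 1 else 0))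
      = (fun (r : Int) (i : Nat) => r * 2 + (if n.testBit i then 1 else 0)) := by
    funext a i
    by_cases h : n.testBit i <;> simp [pvBC, h]
  rw [hf]

-- B's fold is pvF
lemma pvAlt_fold (n : Nat) (m : Nat) :
    (List.range m).foldl (fun (r : Int) (i : Nat) => r * 2 + Int.land ((n : Int) >>> (i : Int)) 1) 0 = pvF n m := by
  unfold pvF
  have hf : (fun (r : Int) (i : Nat) => r * 2 + Int.land ((n : Int) >>> (i : Int)) 1)
      = (fun (r : Int) (i : Nat) => r * 2 + (if n.testBit i then 1 else 0)) := by
    funext r i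
    rw [Int.shiftRight_natCast,
      show Int.land ((n >>> i : Nat) : Int) 1 = (((n >>> i) &&& 1 : Nat) : Int) from rfl,
      Nat.and_one_is_mod]
    have hb : (n >>> i) % 2 = if n.testBit i then 1 else 0 := by
      rcases Nat.mod_two_eq_zero_or_one (n >>> i) with h | h <;>
        simp [Nat.testBit, h]
    rw [hb]
    split <;> simp
  rw [hf]

-- ===== VERDICT (by name: the statement is the Claim_ definition above) =====
theorem bit_reversal_spec : Claim_equal_bit_reversal := by
  intro x N _ hpre
  obtain ⟨hx, hN⟩ := hpre
  unfold Spec_bit_reversal bit_reversal bit_reversal_alt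
  set n : Nat := x.toNat with hn
  have hxn : x = (n : Int) := by omega
  -- A's digit count
  rw [pvNumDigitLoop_eq N hN 0, zero_add]
  set d : Int := max ((pvBitLength N : Int) - 1) 0 with hd
  have hd0 : 0 ≤ d := le_max_right _ _
  -- A's digit list
  have hdig : pvDecimalToBinary x =
      ((List.range (max (pvBL n) 1)).map (pvBC n)).reverse := by
    unfold pvDecimalToBinary
    rw [if_neg (by omega)]
    by_cases h0 : n = 0
    · have : x.natAbs = 0 := by omega
      simp [this, h0, pvBL, pvBC, Nat.testBit]
    · have hna : x.natAbs = n := by omega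
      rw [if_neg (by omega), hna, List.nil_append,
        show max (pvBL n) 1 = pvBL n from by unfold pvBL; rw [if_neg h0]; omega,
        ← pvGoBin_reverse, List.reverse_reverse]
  rw [hdig]
  set L : Nat := max (pvBL n) 1 with hL
  have hlen : (((List.range L).map (pvBC n)).reverse).length = L := by simp
  rw [pvPadLoop_eq, hlen, List.reverse_append, List.reverse_reverse, List.reverse_replicate]
  unfold pvParseBin2
  rw [List.foldl_append]
  rw [show (List.foldl (fun a c => a * 2 + (if c = '1' then 1 else 0)) 0
        ((List.range L).map (pvBC n))) = pvParseBin2 ((List.range L).map (pvBC n)) from rfl]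
  rw [pvParse_bits, pvParse_zeros]
  -- B's side
  rw [hxn, pvAlt_fold n, pvBitLength_natCast]
  -- numeric finish
  have hm : (max (pvBL n : Int) d).toNat = max (pvBL n) d.toNat := by omega
  rw [hm]
  by_cases h0 : n = 0
  · rw [h0, pvF_zero_n, pvF_zero_n]
    ring
  · have hbl1 : 1 ≤ pvBL n := by
      unfold pvBL
      rw [if_neg h0]
      omega
    have hLs : L = pvBL n := by rw [hL]; omega
    rw [hLs]
    have h1 : max (pvBL n) d.toNat = pvBL n + (max (pvBL n) d.toNat - pvBL n) := by omega
    rw [h1, pvF_ext n (pvBL n) _ (le_refl _)]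
    congr 2
    omega
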